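-- pv_equiv track=rewrite | github.com/turtle-cyber/PS02 | AIML/unified_detector.py | _has_trusted_tld
-- ===== SOURCE A (Python) =====
-- def _has_trusted_tld(registrable: str) -> bool:
--     """
--     Check if domain has a trusted TLD (government, education, etc.)
--
--     Args:
--         registrable: Registrable domain
--
--     Returns:
--         True if has trusted TLD
--     """
--     if not registrable:
--         return False
--
--     trusted_tlds = {
--         'gov', 'gov.in', 'nic.in', 'ac.in', 'edu.in', 'mil',
--         'edu', 'mil.in', 'res.in'
--     }
--
--     registrable_lower = registrable.lower()
--     for tld in trusted_tlds:
--         if registrable_lower.endswith(f'.{tld}') or registrable_lower == tld: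
--             return True
--
--     return False
-- ===== SOURCE B (Python) =====
-- def _has_trusted_tld(registrable: str) -> bool:
--     """
--     Check if domain has a trusted TLD (government, education, etc.)
--
--     Walks down the chain of dot-suffixes of the lowered domain: test the
--     current suffix for membership in the trusted set, then strip everything
--     up to and including the first dot and repeat.
--     """
--     trusted_tlds = {
--         'gov', 'gov.in', 'nic.in', 'ac.in', 'edu.in', 'mil',
--         'edu', 'mil.in', 'res.in'
--     }
--
--     s = registrable.lower()
--     while s not in trusted_tlds:
--         dot = s.find('.')
--         if dot == -1:
--             return False
--         s = s[dot + 1:]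
--     return True
-- ===== Notes on version B (the rewrite author's own statement) =====
-- stated objective: alternative
-- what changed: Instead of looping over the nine trusted TLDs and calling endswith for each, B lowercases the domain once and walks its chain of dot-suffixes, repeatedly stripping up to the first dot and testing each suffix for membership in the trusted set.
import Mathlib
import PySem

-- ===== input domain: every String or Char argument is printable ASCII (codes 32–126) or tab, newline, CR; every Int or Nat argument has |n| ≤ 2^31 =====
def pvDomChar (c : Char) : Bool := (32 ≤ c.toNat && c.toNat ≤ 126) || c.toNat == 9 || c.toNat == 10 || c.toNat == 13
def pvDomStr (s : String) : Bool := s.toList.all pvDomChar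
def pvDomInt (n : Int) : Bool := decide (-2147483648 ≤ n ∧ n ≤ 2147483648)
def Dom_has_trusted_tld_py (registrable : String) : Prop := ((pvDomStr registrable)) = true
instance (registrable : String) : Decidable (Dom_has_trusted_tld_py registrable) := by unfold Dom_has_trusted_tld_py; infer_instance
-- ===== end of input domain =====

-- B replaces A's per-TLD endswith loop with a while loop that walks the chain of
-- dot-suffixes of the lowered domain, testing each against the trusted set
-- (objective: alternative, same cost).

-- ===== PORT A =====
-- Python iterates the set literal in hash order; every hit returns the same True, so the
-- result is iteration-order independent and the loop is ported over the literal list.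
def pvTldsA : List (List Char) :=
  ["gov".toList, "gov.in".toList, "nic.in".toList, "ac.in".toList, "edu.in".toList,
   "mil".toList, "edu".toList, "mil.in".toList, "res.in".toList]

def has_trusted_tld_py (registrable : String) : Bool :=
  if registrable = "" then false
  else
    let registrable_lower := PySem.Chars.lower registrable.toList
    pvTldsA.any (fun tld =>
      PySem.Chars.endswith registrable_lower ('.' :: tld) || registrable_lower == tld)

-- ===== PORT B =====
def pvTrustedB : PySem.Set (List Char) :=
  PySem.Set.ofList
    ["gov".toList, "gov.in".toList, "nic.in".toList, "ac.in".toList, "edu.in".toList,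
     "mil".toList, "edu".toList, "mil.in".toList, "res.in".toList]

-- needed by pvLoopB's decreasing_by: slicing from a nonnegative position is a drop
theorem pv_slice_succ (L : List Char) (n : Nat) :
    PySem.Chars.slice L (some ((n : Int) + 1)) none = L.drop (n + 1) := by
  rw [PySem.Chars.slice_eq_listSlice, PySem.List.slice_from L (by positivity)]
  norm_num

-- the while loop of Source B: test membership, else strip up to the first dot and repeat
def pvLoopB (s : List Char) : Bool :=
  if pvTrustedB.contains s then true
  else
    let dot := PySem.Chars.find s ['.']
    if dot = -1 then false
    else pvLoopB (PySem.Chars.slice s (some (dot + 1)) none)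
termination_by s.length
decreasing_by
  have hfind : PySem.Chars.find s ['.'] ≠ -1 := by simpa [dot] using ‹¬ dot = -1›
  have hin : ['.'] <:+: s := (PySem.Chars.find_ne_neg_one_iff s ['.']).mp hfind
  have hnn : 0 ≤ PySem.Chars.find s ['.'] := (PySem.Chars.find_nonneg_iff s ['.']).mpr hin
  have hne : s ≠ [] := by
    rintro rfl
    exact (by decide : ¬ (['.'] <:+: ([] : List Char))) hin
  rw [show PySem.Chars.find s ['.'] = (((PySem.Chars.find s ['.']).toNat : Nat) : Int) from
        (Int.toNat_of_nonneg hnn).symm,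
      pv_slice_succ]
  have : 0 < s.length := List.length_pos_iff.mpr hne
  simp only [List.length_drop]
  omega

def has_trusted_tld_py_alt (registrable : String) : Bool :=
  pvLoopB (PySem.Chars.lower registrable.toList)

-- ===== PRECONDITION & SPEC =====
def Spec_has_trusted_tld_py (registrable : String) (out : Bool) : Prop := out = has_trusted_tld_py_alt registrable
instance (registrable : String) (out : Bool) : Decidable (Spec_has_trusted_tld_py registrable out) := by unfold Spec_has_trusted_tld_py; infer_instance

-- ===== CLAIM (what is proved, stated in full; the proofs are below) =====
def Claim_equal_has_trusted_tld_py : Prop := ∀ (registrable : String), Dom_has_trusted_tld_py registrable → Spec_has_trusted_tld_py registrable (has_trusted_tld_py registrable)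

-- ===== LEMMAS AND PROOFS =====

theorem pv_memB (x : List Char) : pvTrustedB.contains x = true ↔ x ∈ pvTldsA := by
  rw [pvTrustedB, PySem.Set.contains_iff, PySem.Set.mem_ofList, pvTldsA]

-- a '.'-prefixed suffix of L is exactly "a dot at position n followed by the drop"
theorem pv_dot_suffix (L t : List Char) :
    ('.' :: t <:+ L) ↔ ∃ n : Nat, L[n]? = some '.' ∧ L.drop (n + 1) = t := by
  constructor
  · rintro ⟨u, rfl⟩
    exact ⟨u.length, by simp, by simp⟩
  · rintro ⟨n, hn, rfl⟩
    have hlt : n < L.length := (List.getElem?_eq_some_iff.mp hn).1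
    refine ⟨L.take n, ?_⟩
    have hdrop : L.drop n = L[n] :: L.drop (n + 1) := List.drop_eq_getElem_cons hlt
    have hc : L[n] = '.' := (List.getElem?_eq_some_iff.mp hn).2
    rw [hc] at hdrop
    calc L.take n ++ '.' :: L.drop (n + 1) = L.take n ++ L.drop n := by rw [hdrop]
      _ = L := List.take_append_drop n L

-- ['.'] is a prefix of L.drop j iff the character at j is a dot
theorem pv_prefix_dot (L : List Char) (j : Nat) :
    (['.'] <+: L.drop j) ↔ L[j]? = some '.' := by
  have hhead : ∀ (M : List Char), (['.'] <+: M) ↔ M.head? = some '.' := by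
    intro M
    cases M with
    | nil => simp
    | cons c t =>
      simp only [List.cons_prefix_cons, List.head?_cons, Option.some.injEq, List.nil_prefix,
        and_true]
      exact ⟨fun h => h.symm, fun h => h.symm⟩
  rw [hhead, List.head?_drop]

-- if the FIRST dot of L is at position k, the dot-suffixes of L are:
-- the drop after k, and the dot-suffixes of that drop
theorem pv_first_dot (L t : List Char) (k : Nat)
    (hk : L[k]? = some '.') (hmin : ∀ j, j < k → L[j]? ≠ some '.') :
    ('.' :: t <:+ L) ↔ (t = L.drop (k + 1) ∨ '.' :: t <:+ L.drop (k + 1)) := by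
  rw [pv_dot_suffix, pv_dot_suffix]
  constructor
  · rintro ⟨n, hn, rfl⟩
    rcases lt_trichotomy n k with h | rfl | h
    · exact absurd hn (hmin n h)
    · exact Or.inl rfl
    · refine Or.inr ⟨n - (k + 1), ?_, ?_⟩
      · rw [List.getElem?_drop]
        rwa [show k + 1 + (n - (k + 1)) = n by omega]
      · rw [List.drop_drop]; congr 1; omega
  · rintro (rfl | ⟨m, hm, rfl⟩)
    · exact ⟨k, hk, rfl⟩
    · refine ⟨k + 1 + m, ?_, ?_⟩
      · rwa [← List.getElem?_drop]
      · rw [List.drop_drop]; congr 1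

-- the loop of B returns true exactly on A's acceptance condition
theorem pv_loop_true_iff (s : List Char) :
    pvLoopB s = true ↔ (s ∈ pvTldsA ∨ ∃ t ∈ pvTldsA, '.' :: t <:+ s) := by
  induction s using pvLoopB.induct with
  | case1 s hmem =>
    rw [pvLoopB, if_pos hmem]
    exact iff_of_true rfl (Or.inl ((pv_memB s).mp hmem))
  | case2 s hmem dot hdot =>
    have hdot' : PySem.Chars.find s ['.'] = -1 := hdot
    rw [pvLoopB, if_neg hmem, if_pos hdot']
    have hnodot : ¬ (['.'] <:+: s) := by
      intro h
      exact absurd hdot' ((fun hne => hne) ((PySem.Chars.find_ne_neg_one_iff s ['.']).mpr h))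
    constructor
    · intro h; exact absurd h (by simp)
    · rintro (hin | ⟨t, ht, hsuf⟩)
      · exact absurd ((pv_memB s).mpr hin) hmem
      · have h1 : ['.'] <:+: ('.' :: t) := ⟨[], t, rfl⟩
        exact absurd (h1.trans hsuf.isInfix) hnodot
  | case3 s hmem dot hdot ih =>
    have hfind : PySem.Chars.find s ['.'] ≠ -1 := hdot
    have hnn : 0 ≤ PySem.Chars.find s ['.'] :=
      (PySem.Chars.find_nonneg_iff s ['.']).mpr ((PySem.Chars.find_ne_neg_one_iff s ['.']).mp hfind)
    set k : Nat := (PySem.Chars.find s ['.']).toNat with hkdef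
    have hcast : PySem.Chars.find s ['.'] = ((k : Nat) : Int) := (Int.toNat_of_nonneg hnn).symm
    have hspec := PySem.Chars.findFrom_natCast_spec s ['.'] 0 (Nat.zero_le _)
      (by rwa [Nat.cast_zero, PySem.Chars.findFrom_zero])
    rw [Nat.cast_zero, PySem.Chars.findFrom_zero] at hspec
    have hk : s[k]? = some '.' := (pv_prefix_dot s k).mp hspec.2.1
    have hmin : ∀ j, j < k → s[j]? ≠ some '.' := fun j hj hdotj =>
      hspec.2.2 j (Nat.zero_le _) hj ((pv_prefix_dot s j).mpr hdotj)
    have hslice : PySem.Chars.slice s (some (PySem.Chars.find s ['.'] + 1)) none = s.drop (k + 1) := by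
      rw [hcast, pv_slice_succ]
    rw [pvLoopB, if_neg hmem, if_neg hfind, hslice]
    rw [hslice] at ih
    rw [ih]
    constructor
    · rintro (hin | ⟨t, ht, hsuf⟩)
      · exact Or.inr ⟨s.drop (k + 1), hin, (pv_first_dot s _ k hk hmin).mpr (Or.inl rfl)⟩
      · exact Or.inr ⟨t, ht, (pv_first_dot s t k hk hmin).mpr (Or.inr hsuf)⟩
    · rintro (hin | ⟨t, ht, hsuf⟩)
      · exact absurd ((pv_memB s).mpr hin) hmem
      · rcases (pv_first_dot s t k hk hmin).mp hsuf with rfl | hs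
        · exact Or.inl ht
        · exact Or.inr ⟨t, ht, hs⟩

theorem pv_a_true_iff (registrable : String) :
    has_trusted_tld_py registrable = true ↔
      (PySem.Chars.lower registrable.toList ∈ pvTldsA ∨
       ∃ t ∈ pvTldsA, '.' :: t <:+ PySem.Chars.lower registrable.toList) := by
  unfold has_trusted_tld_py
  by_cases h : registrable = ""
  · subst h
    simp only [if_true]
    constructor
    · intro hc; exact absurd hc (by decide)
    · rintro (hin | ⟨t, ht, hsuf⟩)
      · revert hin; decide
      · fin_cases ht <;> simp_all [PySem.Chars.lower]
  · rw [if_neg h, List.any_eq_true]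
    constructor
    · rintro ⟨t, ht, hp⟩
      simp only [Bool.or_eq_true, beq_iff_eq, PySem.Chars.endswith_iff] at hp
      rcases hp with hs | rfl
      · exact Or.inr ⟨t, ht, hs⟩
      · exact Or.inl ht
    · rintro (hin | ⟨t, ht, hsuf⟩)
      · exact ⟨_, hin, by simp⟩
      · exact ⟨t, ht, by simp [PySem.Chars.endswith_iff, hsuf]⟩

-- ===== VERDICT (by name: the statement is the Claim_ definition above) =====
theorem has_trusted_tld_py_spec : Claim_equal_has_trusted_tld_py := by
  intro registrable _
  unfold Spec_has_trusted_tld_py has_trusted_tld_py_alt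
  rw [Bool.eq_iff_iff, pv_a_true_iff, pv_loop_true_iff]
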